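-- pv_equiv track=rewrite | github.com/AlonNaor22/news-summarizer-agent | src/tagger.py | parse_tagging_response
-- ===== SOURCE A (Python) =====
-- def parse_tagging_response(response: str) -> dict:
--     """
--     Parse Claude's response into a structured dictionary.
--
--     This function takes the raw text response from Claude
--     and converts it into a Python dictionary we can use.
--
--     INPUT (from Claude):
--     --------------------
--     "KEYWORDS: ai, technology, smartphones
--      PEOPLE: Tim Cook, Elon Musk
--      ORGANIZATIONS: Apple, Tesla
--      LOCATIONS: California"
--
--     OUTPUT (Python dict):
--     ---------------------
--     {
--         "keywords": ["ai", "technology", "smartphones"],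
--         "people": ["Tim Cook", "Elon Musk"],
--         "organizations": ["Apple", "Tesla"],
--         "locations": ["California"]
--     }
--
--     WHY DO WE NEED THIS?
--     --------------------
--     Claude returns text, but we need structured data.
--     This function bridges that gap by parsing the text.
--     """
--
--     result = {
--         "keywords": [],
--         "people": [],
--         "organizations": [],
--         "locations": []
--     }
--
--     # Split response into lines
--     lines = response.strip().split("\n")
--
--     for line in lines:
--         line = line.strip()
--
--         # Parse KEYWORDS line
--         if line.upper().startswith("KEYWORDS:"):
--             value = line.split(":", 1)[1].strip()
--             if value.lower() != "none":
--                 # Split by comma, clean each keyword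
--                 result["keywords"] = [
--                     kw.strip().lower()
--                     for kw in value.split(",")
--                     if kw.strip()
--                 ]
--
--         # Parse PEOPLE line
--         elif line.upper().startswith("PEOPLE:"):
--             value = line.split(":", 1)[1].strip()
--             if value.lower() != "none":
--                 result["people"] = [
--                     p.strip()
--                     for p in value.split(",")
--                     if p.strip()
--                 ]
--
--         # Parse ORGANIZATIONS line
--         elif line.upper().startswith("ORGANIZATIONS:"):
--             value = line.split(":", 1)[1].strip()
--             if value.lower() != "none":
--                 result["organizations"] = [
--                     o.strip()
--                     for o in value.split(",")
--                     if o.strip()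
--                 ]
--
--         # Parse LOCATIONS line
--         elif line.upper().startswith("LOCATIONS:"):
--             value = line.split(":", 1)[1].strip()
--             if value.lower() != "none":
--                 result["locations"] = [
--                     loc.strip()
--                     for loc in value.split(",")
--                     if loc.strip()
--                 ]
--
--     return result
-- ===== SOURCE B (Python) =====
-- def parse_tagging_response(response: str) -> dict:
--     """Per-category backward search: each of the four lists is computed
--     independently by scanning the lines in reverse for the last matching
--     line whose value is not 'none' (last-line-wins falls out of the
--     reverse-first-match), instead of one forward pass mutating a dict."""
--     lines = [ln.strip() for ln in response.strip().split("\n")]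
--
--     def find(prefix, lower):
--         for line in reversed(lines):
--             if line.upper().startswith(prefix):
--                 value = line.split(":", 1)[1].strip()
--                 if value.lower() != "none":
--                     return [
--                         (t.strip().lower() if lower else t.strip())
--                         for t in value.split(",")
--                         if t.strip()
--                     ]
--         return []
--
--     return {
--         "keywords": find("KEYWORDS:", True),
--         "people": find("PEOPLE:", False),
--         "organizations": find("ORGANIZATIONS:", False),
--         "locations": find("LOCATIONS:", False),
--     }
-- ===== Notes on version B (the rewrite author's own statement) =====
-- stated objective: alternative
-- what changed: Instead of A's single forward pass mutating a four-key dict, B builds each category list independently by scanning the stripped lines in reverse for the last matching line whose value is not 'none' (last-line-wins becomes reverse-first-match), then assembles the dict literal once.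
import Mathlib
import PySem

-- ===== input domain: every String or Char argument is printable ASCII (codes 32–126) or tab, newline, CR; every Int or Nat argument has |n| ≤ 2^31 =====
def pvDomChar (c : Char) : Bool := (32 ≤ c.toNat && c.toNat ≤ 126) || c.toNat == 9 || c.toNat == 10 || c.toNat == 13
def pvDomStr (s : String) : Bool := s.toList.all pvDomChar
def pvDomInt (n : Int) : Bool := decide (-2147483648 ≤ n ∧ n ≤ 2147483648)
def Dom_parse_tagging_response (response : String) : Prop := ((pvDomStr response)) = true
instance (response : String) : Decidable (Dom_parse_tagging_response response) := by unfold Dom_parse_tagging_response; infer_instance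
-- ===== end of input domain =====

-- B computes each of the four lists independently by a backward scan for the last matching
-- non-"none" line, instead of A's single forward pass mutating a dict: alternative decomposition.

-- ===== PORT A =====
-- the body of A's for-loop, named (line0 is the raw line; 'let line = line0.strip()' inside);
-- line.split(":", 1)[1] is ported as pyGetD … 1 "": the index is always in range because the
-- matched prefix contains ':'
def pvAStep (result : PySem.Dict String (List String)) (line0 : String) :
    PySem.Dict String (List String) :=
  let line := PySem.Str.strip line0
  if PySem.Str.startswith (PySem.Str.upper line) "KEYWORDS:" then
    let value := PySem.Str.strip
      (PySem.List.pyGetD ((PySem.Str.splitMax? line ":" 1).getD []) 1 "")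
    if PySem.Str.lower value ≠ "none" then
      result.insert "keywords"
        ((((PySem.Str.split? value ",").getD []).filter
            (fun kw => PySem.Str.strip kw ≠ "")).map
          (fun kw => PySem.Str.lower (PySem.Str.strip kw)))
    else result
  else if PySem.Str.startswith (PySem.Str.upper line) "PEOPLE:" then
    let value := PySem.Str.strip
      (PySem.List.pyGetD ((PySem.Str.splitMax? line ":" 1).getD []) 1 "")
    if PySem.Str.lower value ≠ "none" then
      result.insert "people"
        ((((PySem.Str.split? value ",").getD []).filter
            (fun p => PySem.Str.strip p ≠ "")).map
          (fun p => PySem.Str.strip p))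
    else result
  else if PySem.Str.startswith (PySem.Str.upper line) "ORGANIZATIONS:" then
    let value := PySem.Str.strip
      (PySem.List.pyGetD ((PySem.Str.splitMax? line ":" 1).getD []) 1 "")
    if PySem.Str.lower value ≠ "none" then
      result.insert "organizations"
        ((((PySem.Str.split? value ",").getD []).filter
            (fun o => PySem.Str.strip o ≠ "")).map
          (fun o => PySem.Str.strip o))
    else result
  else if PySem.Str.startswith (PySem.Str.upper line) "LOCATIONS:" then
    let value := PySem.Str.strip
      (PySem.List.pyGetD ((PySem.Str.splitMax? line ":" 1).getD []) 1 "")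
    if PySem.Str.lower value ≠ "none" then
      result.insert "locations"
        ((((PySem.Str.split? value ",").getD []).filter
            (fun loc => PySem.Str.strip loc ≠ "")).map
          (fun loc => PySem.Str.strip loc))
    else result
  else result

def parse_tagging_response (response : String) : List (String × List String) :=
  let result : PySem.Dict String (List String) :=
    ((((PySem.Dict.empty).insert "keywords" []).insert "people" []).insert
      "organizations" []).insert "locations" []
  let lines := (PySem.Str.split? (PySem.Str.strip response) "\n").getD []
  (lines.foldl pvAStep result).items

-- ===== PORT B =====
-- B's 'for line in reversed(lines): …' search loop (the argument is the already-reversed list)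
def pvFindGo (pre : String) (low : Bool) : List String → List String
  | [] => []
  | line :: rest =>
    if PySem.Str.startswith (PySem.Str.upper line) pre then
      let value := PySem.Str.strip
        (PySem.List.pyGetD ((PySem.Str.splitMax? line ":" 1).getD []) 1 "")
      if PySem.Str.lower value ≠ "none" then
        (((PySem.Str.split? value ",").getD []).filter
            (fun t => PySem.Str.strip t ≠ "")).map
          (fun t => if low then PySem.Str.lower (PySem.Str.strip t)
                    else PySem.Str.strip t)
      else pvFindGo pre low rest
    else pvFindGo pre low rest

def parse_tagging_response_alt (response : String) : List (String × List String) :=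
  let lines := ((PySem.Str.split? (PySem.Str.strip response) "\n").getD []).map
    PySem.Str.strip
  [("keywords", pvFindGo "KEYWORDS:" true lines.reverse),
   ("people", pvFindGo "PEOPLE:" false lines.reverse),
   ("organizations", pvFindGo "ORGANIZATIONS:" false lines.reverse),
   ("locations", pvFindGo "LOCATIONS:" false lines.reverse)]

-- ===== PRECONDITION & SPEC =====
def Spec_parse_tagging_response (response : String) (out : List (String × List String)) : Prop := out = parse_tagging_response_alt response
instance (response : String) (out : List (String × List String)) : Decidable (Spec_parse_tagging_response response out) := by unfold Spec_parse_tagging_response; infer_instance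

-- ===== CLAIM (what is proved, stated in full; the proofs are below) =====
def Claim_equal_parse_tagging_response : Prop := ∀ (response : String), Dom_parse_tagging_response response → Spec_parse_tagging_response response (parse_tagging_response response)

-- ===== LEMMAS AND PROOFS =====

-- per-category single-key update step (on an already-stripped line)
def pvSStep (pre : String) (low : Bool) (c : List String) (line : String) : List String :=
  if PySem.Str.startswith (PySem.Str.upper line) pre then
    let value := PySem.Str.strip
      (PySem.List.pyGetD ((PySem.Str.splitMax? line ":" 1).getD []) 1 "")
    if PySem.Str.lower value ≠ "none" then
      (((PySem.Str.split? value ",").getD []).filter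
          (fun t => PySem.Str.strip t ≠ "")).map
        (fun t => if low then PySem.Str.lower (PySem.Str.strip t)
                  else PySem.Str.strip t)
    else c
  else c

-- pvFindGo generalized to an arbitrary base value
def pvFindGoB (pre : String) (low : Bool) (c : List String) : List String → List String
  | [] => c
  | line :: rest =>
    if PySem.Str.startswith (PySem.Str.upper line) pre then
      let value := PySem.Str.strip
        (PySem.List.pyGetD ((PySem.Str.splitMax? line ":" 1).getD []) 1 "")
      if PySem.Str.lower value ≠ "none" then
        (((PySem.Str.split? value ",").getD []).filter
            (fun t => PySem.Str.strip t ≠ "")).map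
          (fun t => if low then PySem.Str.lower (PySem.Str.strip t)
                    else PySem.Str.strip t)
      else pvFindGoB pre low c rest
    else pvFindGoB pre low c rest

lemma pvFindGoB_nil_base (pre : String) (low : Bool) (L : List String) :
    pvFindGoB pre low [] L = pvFindGo pre low L := by
  induction L with
  | nil => rfl
  | cons x rest ih => simp only [pvFindGoB, pvFindGo, ih]

lemma pvFindGoB_append_singleton (pre : String) (low : Bool) (c : List String)
    (L : List String) (x : String) :
    pvFindGoB pre low c (L ++ [x]) = pvFindGoB pre low (pvSStep pre low c x) L := by
  induction L with
  | nil => rfl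
  | cons y rest ih => simp only [List.cons_append, pvFindGoB, ih]

lemma pvFoldl_eq_findrev (pre : String) (low : Bool) (L : List String) (c : List String) :
    L.foldl (pvSStep pre low) c = pvFindGoB pre low c L.reverse := by
  induction L generalizing c with
  | nil => rfl
  | cons x rest ih =>
    simp only [List.foldl_cons, List.reverse_cons, pvFindGoB_append_singleton, ih]

-- the 4-key dict literal A builds and maintains
def pvD4 (k p o l : List String) : PySem.Dict String (List String) :=
  ((((PySem.Dict.empty).insert "keywords" k).insert "people" p).insert
    "organizations" o).insert "locations" l

lemma pvD4_mk (k p o l : List String) :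
    pvD4 k p o l = PySem.Dict.mk
      [("keywords", k), ("people", p), ("organizations", o), ("locations", l)] := by
  rfl

lemma pvD4_insert_k (k p o l v : List String) :
    (pvD4 k p o l).insert "keywords" v = pvD4 v p o l := by rfl
lemma pvD4_insert_p (k p o l v : List String) :
    (pvD4 k p o l).insert "people" v = pvD4 k v o l := by rfl
lemma pvD4_insert_o (k p o l v : List String) :
    (pvD4 k p o l).insert "organizations" v = pvD4 k p v l := by rfl
lemma pvD4_insert_l (k p o l v : List String) :
    (pvD4 k p o l).insert "locations" v = pvD4 k p o v := by rfl

-- the four prefixes are mutually exclusive (distinct first characters)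
lemma pvExclKP {s : String} (h : PySem.Str.startswith s "KEYWORDS:" = true) :
    PySem.Str.startswith s "PEOPLE:" = false := by
  by_contra hc
  rw [Bool.not_eq_false] at hc
  rw [PySem.Str.startswith_eq, PySem.Chars.startswith_iff] at hc
  rw [PySem.Str.startswith_eq, PySem.Chars.startswith_iff] at h
  obtain ⟨t, ht⟩ := h
  obtain ⟨u, hu⟩ := hc
  rw [← ht] at hu
  simp at hu

lemma pvExclKO {s : String} (h : PySem.Str.startswith s "KEYWORDS:" = true) :
    PySem.Str.startswith s "ORGANIZATIONS:" = false := by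
  by_contra hc
  rw [Bool.not_eq_false] at hc
  rw [PySem.Str.startswith_eq, PySem.Chars.startswith_iff] at hc
  rw [PySem.Str.startswith_eq, PySem.Chars.startswith_iff] at h
  obtain ⟨t, ht⟩ := h
  obtain ⟨u, hu⟩ := hc
  rw [← ht] at hu
  simp at hu

lemma pvExclKL {s : String} (h : PySem.Str.startswith s "KEYWORDS:" = true) :
    PySem.Str.startswith s "LOCATIONS:" = false := by
  by_contra hc
  rw [Bool.not_eq_false] at hc
  rw [PySem.Str.startswith_eq, PySem.Chars.startswith_iff] at hc
  rw [PySem.Str.startswith_eq, PySem.Chars.startswith_iff] at h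
  obtain ⟨t, ht⟩ := h
  obtain ⟨u, hu⟩ := hc
  rw [← ht] at hu
  simp at hu

lemma pvExclPO {s : String} (h : PySem.Str.startswith s "PEOPLE:" = true) :
    PySem.Str.startswith s "ORGANIZATIONS:" = false := by
  by_contra hc
  rw [Bool.not_eq_false] at hc
  rw [PySem.Str.startswith_eq, PySem.Chars.startswith_iff] at hc
  rw [PySem.Str.startswith_eq, PySem.Chars.startswith_iff] at h
  obtain ⟨t, ht⟩ := h
  obtain ⟨u, hu⟩ := hc
  rw [← ht] at hu
  simp at hu

lemma pvExclPL {s : String} (h : PySem.Str.startswith s "PEOPLE:" = true) :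
    PySem.Str.startswith s "LOCATIONS:" = false := by
  by_contra hc
  rw [Bool.not_eq_false] at hc
  rw [PySem.Str.startswith_eq, PySem.Chars.startswith_iff] at hc
  rw [PySem.Str.startswith_eq, PySem.Chars.startswith_iff] at h
  obtain ⟨t, ht⟩ := h
  obtain ⟨u, hu⟩ := hc
  rw [← ht] at hu
  simp at hu

lemma pvExclOL {s : String} (h : PySem.Str.startswith s "ORGANIZATIONS:" = true) :
    PySem.Str.startswith s "LOCATIONS:" = false := by
  by_contra hc
  rw [Bool.not_eq_false] at hc
  rw [PySem.Str.startswith_eq, PySem.Chars.startswith_iff] at hc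
  rw [PySem.Str.startswith_eq, PySem.Chars.startswith_iff] at h
  obtain ⟨t, ht⟩ := h
  obtain ⟨u, hu⟩ := hc
  rw [← ht] at hu
  simp at hu
-- A's loop step on pvD4 decomposes into the four independent per-key steps
lemma pvAStep_D4 (k p o l : List String) (line0 : String) :
    pvAStep (pvD4 k p o l) line0 =
      pvD4 (pvSStep "KEYWORDS:" true k (PySem.Str.strip line0))
           (pvSStep "PEOPLE:" false p (PySem.Str.strip line0))
           (pvSStep "ORGANIZATIONS:" false o (PySem.Str.strip line0))
           (pvSStep "LOCATIONS:" false l (PySem.Str.strip line0)) := by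
  unfold pvAStep pvSStep
  generalize PySem.Str.strip line0 = line
  by_cases hK : PySem.Str.startswith (PySem.Str.upper line) "KEYWORDS:" = true
  · simp only [hK, pvExclKP hK, pvExclKO hK, pvExclKL hK, Bool.false_eq_true,
      if_false, if_true]
    split
    · exact pvD4_insert_k ..
    · rfl
  · simp only [Bool.not_eq_true] at hK
    by_cases hP : PySem.Str.startswith (PySem.Str.upper line) "PEOPLE:" = true
    · simp only [hK, hP, pvExclPO hP, pvExclPL hP, Bool.false_eq_true,
        if_false, if_true]
      split
      · exact pvD4_insert_p ..
      · rfl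
    · simp only [Bool.not_eq_true] at hP
      by_cases hO : PySem.Str.startswith (PySem.Str.upper line) "ORGANIZATIONS:" = true
      · simp only [hK, hP, hO, pvExclOL hO, Bool.false_eq_true, if_false, if_true]
        split
        · exact pvD4_insert_o ..
        · rfl
      · simp only [Bool.not_eq_true] at hO
        by_cases hL : PySem.Str.startswith (PySem.Str.upper line) "LOCATIONS:" = true
        · simp only [hK, hP, hO, hL, Bool.false_eq_true, if_false, if_true]
          split
          · exact pvD4_insert_l ..
          · rfl
        · simp only [Bool.not_eq_true] at hL
          simp only [hK, hP, hO, hL, Bool.false_eq_true, if_false]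

-- A's whole fold is the tuple of four independent per-key folds over the stripped lines
lemma pvFold_D4 (lines : List String) (k p o l : List String) :
    lines.foldl pvAStep (pvD4 k p o l) =
      pvD4 ((lines.map PySem.Str.strip).foldl (pvSStep "KEYWORDS:" true) k)
           ((lines.map PySem.Str.strip).foldl (pvSStep "PEOPLE:" false) p)
           ((lines.map PySem.Str.strip).foldl (pvSStep "ORGANIZATIONS:" false) o)
           ((lines.map PySem.Str.strip).foldl (pvSStep "LOCATIONS:" false) l) := by
  induction lines generalizing k p o l with
  | nil => rfl
  | cons x rest ih => simp only [List.foldl_cons, List.map_cons, pvAStep_D4, ih]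

lemma pvMain (lines : List String) :
    (lines.foldl pvAStep (pvD4 [] [] [] [])).items =
      [("keywords", pvFindGo "KEYWORDS:" true (lines.map PySem.Str.strip).reverse),
       ("people", pvFindGo "PEOPLE:" false (lines.map PySem.Str.strip).reverse),
       ("organizations", pvFindGo "ORGANIZATIONS:" false (lines.map PySem.Str.strip).reverse),
       ("locations", pvFindGo "LOCATIONS:" false (lines.map PySem.Str.strip).reverse)] := by
  rw [pvFold_D4, pvD4_mk]
  simp only [pvFoldl_eq_findrev, pvFindGoB_nil_base]

-- ===== VERDICT (by name: the statement is the Claim_ definition above) =====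
theorem parse_tagging_response_spec : Claim_equal_parse_tagging_response := by
  intro response _
  show parse_tagging_response response = parse_tagging_response_alt response
  exact pvMain ((PySem.Str.split? (PySem.Str.strip response) "\n").getD [])
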